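-- pv_equiv track=rewrite | github.com/luisschubert/morse_micro_spi_analyzer | HighLevelAnalyzer.py | _decode_irq_bits
-- ===== SOURCE A (Python) =====
-- def _decode_irq_bits(irq_value):
--     '''Decode IRQ status bits into human-readable description'''
--     if irq_value == 0:
--         return "None"
--
--     bits = []
--
--     # Bits 0-13: Pager interrupts
--     for i in range(14):
--         if irq_value & (1 << i):
--             bits.append(f"Pager{i}")
--
--     # Bit 15: TX status available
--     if irq_value & (1 << 15):
--         bits.append("TxStatus")
--
--     # Bits 17-24: Beacon VIF interrupts
--     for i in range(17, 25):
--         if irq_value & (1 << i):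
--             bits.append(f"Beacon{i-17}")
--
--     # Bits 25-26: NDP probe request interrupts
--     if irq_value & (1 << 25):
--         bits.append("NDP0")
--     if irq_value & (1 << 26):
--         bits.append("NDP1")
--
--     # Bit 27: HW stop notification
--     if irq_value & (1 << 27):
--         bits.append("HW_STOP")
--
--     # Bits 28-31: Reserved/unknown
--     for i in range(28, 32):
--         if irq_value & (1 << i):
--             bits.append(f"Bit{i}")
--
--     return ",".join(bits) if bits else "Unknown"
-- ===== SOURCE B (Python) =====
-- def _label(i):
--     '''Label for IRQ bit index i, or None if the bit is unnamed (14, 16).'''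
--     if i < 14:
--         return f"Pager{i}"
--     if i == 15:
--         return "TxStatus"
--     if 17 <= i <= 24:
--         return f"Beacon{i - 17}"
--     if i == 25:
--         return "NDP0"
--     if i == 26:
--         return "NDP1"
--     if i == 27:
--         return "HW_STOP"
--     if 28 <= i <= 31:
--         return f"Bit{i}"
--     return None
--
--
-- def _decode_irq_bits(irq_value):
--     '''Decode IRQ status bits by stripping set bits one at a time (lowest first).'''
--     if irq_value == 0:
--         return "None"
--     bits = []
--     m = irq_value & 0xFFFFFFFF        # the 32 bits the decoder cares about
--     while m:
--         m2 = m & (m - 1)              # m with its lowest set bit cleared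
--         i = (m - m2).bit_length() - 1  # index of that lowest set bit
--         lab = _label(i)
--         if lab is not None:
--             bits.append(lab)
--         m = m2
--     return ",".join(bits) if bits else "Unknown"
-- ===== Notes on version B (the rewrite author's own statement) =====
-- stated objective: alternative
-- what changed: Instead of A's seven hard-coded branch groups testing every bit position of the word in turn, B masks the value to the low word and loops only over its set bits, clearing the lowest set bit each step with m & (m-1) and naming its index ((m - m2).bit_length() - 1) via an arithmetic label function.
import Mathlib
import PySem

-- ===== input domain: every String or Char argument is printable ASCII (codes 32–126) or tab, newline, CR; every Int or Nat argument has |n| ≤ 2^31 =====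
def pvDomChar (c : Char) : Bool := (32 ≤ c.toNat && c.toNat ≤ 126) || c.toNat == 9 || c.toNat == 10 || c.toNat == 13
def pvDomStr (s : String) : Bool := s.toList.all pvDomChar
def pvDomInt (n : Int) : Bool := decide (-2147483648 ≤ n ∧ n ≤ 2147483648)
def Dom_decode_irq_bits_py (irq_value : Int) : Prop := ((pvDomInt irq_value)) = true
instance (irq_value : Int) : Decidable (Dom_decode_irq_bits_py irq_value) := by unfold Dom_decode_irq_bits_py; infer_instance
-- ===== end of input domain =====

-- B decodes by stripping one set bit at a time (m & (m-1) / bit_length) and naming each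
-- bit index with an arithmetic label function, instead of A's seven hard-coded branch
-- groups scanning every bit position in turn (objective: alternative; same cost).

-- ===== PORT A =====
-- Python's `1 << i` (i a nonnegative int here): one fixed elaboration, used by every branch
def pvShl1 (i : Int) : Int := 1 <<< i.toNat

-- Python `irq_value & (1 << i)` truthiness is ported as `PySem.Int.band irq_value (pvShl1 i) ≠ 0`
-- (the loop indices are nonnegative, so `.toNat` inside pvShl1 is exact).
def decode_irq_bits_py (irq_value : Int) : String :=
  if irq_value = 0 then "None"
  else
    let bits : List String := []
    let bits := (PySem.List.pyRange 0 14 1).foldl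
      (fun acc i => if PySem.Int.band irq_value (pvShl1 i) ≠ 0
        then acc ++ ["Pager" ++ PySem.Int.toStr i] else acc) bits
    let bits := if PySem.Int.band irq_value (pvShl1 15) ≠ 0 then bits ++ ["TxStatus"] else bits
    let bits := (PySem.List.pyRange 17 25 1).foldl
      (fun acc i => if PySem.Int.band irq_value (pvShl1 i) ≠ 0
        then acc ++ ["Beacon" ++ PySem.Int.toStr (i - 17)] else acc) bits
    let bits := if PySem.Int.band irq_value (pvShl1 25) ≠ 0 then bits ++ ["NDP0"] else bits
    let bits := if PySem.Int.band irq_value (pvShl1 26) ≠ 0 then bits ++ ["NDP1"] else bits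
    let bits := if PySem.Int.band irq_value (pvShl1 27) ≠ 0 then bits ++ ["HW_STOP"] else bits
    let bits := (PySem.List.pyRange 28 32 1).foldl
      (fun acc i => if PySem.Int.band irq_value (pvShl1 i) ≠ 0
        then acc ++ ["Bit" ++ PySem.Int.toStr i] else acc) bits
    if bits ≠ [] then PySem.Str.join "," bits else "Unknown"

-- ===== PORT B =====
-- Source B's `_label(i)`: name of IRQ bit index i, or none for the unnamed bits (14, 16)
def pvLabel (i : Int) : Option String :=
  if i < 14 then some ("Pager" ++ PySem.Int.toStr i)
  else if i = 15 then some "TxStatus"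
  else if 17 ≤ i ∧ i ≤ 24 then some ("Beacon" ++ PySem.Int.toStr (i - 17))
  else if i = 25 then some "NDP0"
  else if i = 26 then some "NDP1"
  else if i = 27 then some "HW_STOP"
  else if 28 ≤ i ∧ i ≤ 31 then some ("Bit" ++ PySem.Int.toStr i)
  else none

-- termination of the strip loop: clearing the lowest set bit strictly decreases m
theorem pvStrip_lt (m : Int) (h : 0 < m) : (PySem.Int.band m (m - 1)).toNat < m.toNat := by
  rw [PySem.Int.band_of_nonneg (by omega) (by omega)]
  have h2 : m.toNat &&& (m - 1).toNat ≤ (m - 1).toNat := Nat.and_le_right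
  omega

-- Source B's while loop; m is nonnegative throughout (it starts as a masked value), so the
-- guard `m ≤ 0` coincides with Python's `while m:` there (and makes the function total).
def pvStripLoop (m : Int) (acc : List String) : List String :=
  if h : m ≤ 0 then acc
  else
    let m2 := PySem.Int.band m (m - 1)
    let i : Int := (PySem.Int.bitLength (m - m2) : Int) - 1
    let acc' := match pvLabel i with
      | some s => acc ++ [s]
      | none => acc
    pvStripLoop m2 acc'
termination_by m.toNat
decreasing_by exact pvStrip_lt m (by omega)

def decode_irq_bits_py_alt (irq_value : Int) : String :=
  if irq_value = 0 then "None"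
  else
    let bits := pvStripLoop (PySem.Int.band irq_value 4294967295) []
    if bits ≠ [] then PySem.Str.join "," bits else "Unknown"

-- ===== PRECONDITION & SPEC =====
def Spec_decode_irq_bits_py (irq_value : Int) (out : String) : Prop := out = decode_irq_bits_py_alt irq_value
instance (irq_value : Int) (out : String) : Decidable (Spec_decode_irq_bits_py irq_value out) := by unfold Spec_decode_irq_bits_py; infer_instance

-- ===== CLAIM (what is proved, stated in full; the proofs are below) =====
def Claim_equal_decode_irq_bits_py : Prop := ∀ (irq_value : Int), Dom_decode_irq_bits_py irq_value → Spec_decode_irq_bits_py irq_value (decode_irq_bits_py irq_value)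

-- ===== LEMMAS AND PROOFS =====

-- the common normal form both programs' bit lists are reduced to
def pvG (v : Int) (i : Int) : Option String :=
  if PySem.Int.band v (pvShl1 i) ≠ 0 then pvLabel i else none

def pvNG (n : Nat) (k : Nat) : Option String :=
  if n.testBit k then pvLabel (k : Int) else none

-- ---- generic Nat bit lemmas ----
theorem pvEvenAndOdd (a b : Nat) : (2*a) &&& (2*b+1) = 2*(a &&& b) := by
  apply Nat.eq_of_testBit_eq; intro i
  cases i with
  | zero => simp [Nat.testBit_zero]
  | succ i =>
    simp only [Nat.testBit_and]
    simp [Nat.testBit_add_one, Nat.mul_add_div, Nat.testBit_and]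

theorem pvOddAndEven (a b : Nat) : (2*a+1) &&& (2*b) = 2*(a &&& b) := by
  apply Nat.eq_of_testBit_eq; intro i
  cases i with
  | zero => simp [Nat.testBit_zero]
  | succ i =>
    simp only [Nat.testBit_and]
    simp [Nat.testBit_add_one, Nat.mul_add_div, Nat.testBit_and]

theorem pvTestBit_mulPow_lt (k : Nat) : ∀ m i, i < k → (2^k * m).testBit i = false := by
  induction k with
  | zero => omega
  | succ k ih =>
    intro m i hi
    have h2 : 2^(k+1)*m = 2*(2^k*m) := by ring
    cases i with
    | zero => simp [h2, Nat.testBit_zero]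
    | succ i =>
      rw [h2, Nat.testBit_add_one, Nat.mul_div_cancel_left _ (by norm_num)]
      exact ih m i (by omega)

theorem pvTestBit_mulPow_add (k : Nat) : ∀ m j, (2^k * m).testBit (k+j) = m.testBit j := by
  induction k with
  | zero => simp
  | succ k ih =>
    intro m j
    have h2 : 2^(k+1)*m = 2*(2^k*m) := by ring
    have h3 : k+1+j = (k+j)+1 := by omega
    rw [h2, h3, Nat.testBit_add_one, Nat.mul_div_cancel_left _ (by norm_num)]
    exact ih m j

-- clearing the lowest set bit: (2^k*(2q+1)) & (2^k*(2q+1) - 1) = 2^(k+1)*q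
theorem pvAndPred (k : Nat) : ∀ q, (2^k*(2*q+1)) &&& (2^k*(2*q+1) - 1) = 2^(k+1)*q := by
  induction k with
  | zero =>
    intro q
    have : (2*q+1) - 1 = 2*q := by omega
    simp only [pow_zero, one_mul, this]
    rw [pvOddAndEven q q, Nat.and_self]; norm_num
  | succ k ih =>
    intro q
    have ha : 0 < 2^k*(2*q+1) := by positivity
    have h1 : 2^(k+1)*(2*q+1) = 2*(2^k*(2*q+1)) := by ring
    have h2 : 2*(2^k*(2*q+1)) - 1 = 2*((2^k*(2*q+1)) - 1) + 1 := by omega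
    rw [h1, h2, pvEvenAndOdd, ih q]; ring

theorem pvBLpow : ∀ k, PySem.Int.bitLength (((2^k : Nat) : Int)) = k + 1 := by
  intro k
  induction k with
  | zero => decide
  | succ k ih =>
    rw [PySem.Int.bitLength_natCast (by positivity)]
    have : 2^(k+1)/2 = 2^k := by omega
    rw [this, ih]

-- 32-bit complement: testBit of (2^K - 1 - u) inside the mask
theorem pvComplTest : ∀ K u i, u < 2^K → i < K → (2^K - 1 - u).testBit i = !u.testBit i := by
  intro K
  induction K with
  | zero => omega
  | succ K ih =>
    intro u i hu hi
    have hP : 0 < 2^K := Nat.two_pow_pos K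
    have hPP : 2^(K+1) = 2*2^K := by ring
    cases i with
    | zero =>
      simp only [Nat.testBit_zero]
      have h2 : u % 2 = 0 ∨ u % 2 = 1 := by omega
      have h3 : (2^(K+1) - 1 - u) % 2 = 1 - u % 2 := by omega
      rcases h2 with h2 | h2 <;> simp [h3, h2]
    | succ i =>
      rw [Nat.testBit_add_one, Nat.testBit_add_one]
      have hdiv : (2^(K+1) - 1 - u)/2 = 2^K - 1 - u/2 := by omega
      rw [hdiv]
      exact ih (u/2) i (by omega) (by omega)

theorem pvMaskMod (K x : Nat) : (2^K - 1) &&& x = x % 2^K := by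
  apply Nat.eq_of_testBit_eq; intro i
  rw [Nat.testBit_and, Nat.testBit_two_pow_sub_one, Nat.testBit_mod_two_pow, Bool.and_comm]

theorem pvShl1_natCast (k : Nat) : pvShl1 ((k:Nat):Int) = ((2^k : Nat) : Int) := by
  simp [pvShl1, Int.shiftLeft_eq]

-- ---- the bridge: bit k of the masked value is exactly A's truthiness test ----
theorem pvBitIff (v : Int) (k : Nat) (hk : k < 32) :
    (PySem.Int.band v 4294967295).toNat.testBit k = true ↔ PySem.Int.band v (pvShl1 ((k:Nat):Int)) ≠ 0 := by
  rw [pvShl1_natCast k]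
  have hM : (4294967295:Int).toNat = 2^32 - 1 := by decide
  have hp : ((2^k:Nat):Int).toNat = 2^k := Int.toNat_natCast _
  by_cases hv : 0 ≤ v
  · rw [PySem.Int.band_of_nonneg hv (by norm_num), PySem.Int.band_of_nonneg hv (by positivity)]
    rw [hM, hp, Int.toNat_natCast]
    rw [Nat.and_comm, pvMaskMod, Nat.testBit_mod_two_pow, Nat.and_two_pow]
    cases hb : v.toNat.testBit k <;> simp [hk]
  · have h1 : PySem.Int.band v 4294967295 = ((2^32 - 1 - ((-v-1).toNat % 2^32) : Nat) : Int) := by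
      simp only [PySem.Int.band, if_neg hv, if_pos (by norm_num : (0:Int) ≤ 4294967295)]
      rw [hM, pvMaskMod]
    have h2 : PySem.Int.band v ((2^k:Nat):Int) = ((2^k - (((-v-1).toNat.testBit k).toNat * 2^k) : Nat) : Int) := by
      simp only [PySem.Int.band, if_neg hv, if_pos (by positivity : (0:Int) ≤ ((2^k:Nat):Int))]
      rw [hp, Nat.and_comm, Nat.and_two_pow]
    rw [h1, h2, Int.toNat_natCast]
    have hmod : (-v-1).toNat % 2^32 < 2^32 := Nat.mod_lt _ (by positivity)
    rw [pvComplTest 32 _ k hmod hk, Nat.testBit_mod_two_pow]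
    cases hb : (-v-1).toNat.testBit k <;> simp [hk]

theorem pvBit (v : Int) (k : Nat) (hk : k < 32) :
    pvNG (PySem.Int.band v 4294967295).toNat k = pvG v (k : Int) := by
  unfold pvNG pvG
  by_cases hb : (PySem.Int.band v 4294967295).toNat.testBit k
  · rw [if_pos hb, if_pos ((pvBitIff v k hk).mp hb)]
  · rw [if_neg hb, if_neg (fun hne => hb ((pvBitIff v k hk).mpr hne))]

-- ---- B: the strip loop computes the filterMap of pvNG over 0..31 ----
theorem pvRangeSplit (k : Nat) (h : k ≤ 32) :
    List.range' 0 32 = List.range' 0 k ++ List.range' k (32-k) := by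
  have h2 := (List.range'_append (s := 0) (m := k) (n := 32-k) (step := 1)).symm
  simpa [show k+(32-k)=32 from by omega] using h2

theorem pvSpecSplit (k q : Nat) (hk : k < 32) :
    (List.range' 0 32).filterMap (pvNG (2^k*(2*q+1))) =
      (match pvLabel (k:Int) with | some s => [s] | none => []) ++
        (List.range' 0 32).filterMap (pvNG (2^(k+1)*q)) := by
  have c1 : (List.range' 0 k).filterMap (pvNG (2^k*(2*q+1))) = [] := by
    rw [List.filterMap_eq_nil_iff]; intro a ha
    have hlt : a < k := by have := List.mem_range'_1.mp ha; omega
    simp [pvNG, pvTestBit_mulPow_lt k _ a hlt]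
  have c2 : pvNG (2^k*(2*q+1)) k = pvLabel (k:Int) := by
    have := pvTestBit_mulPow_add k (2*q+1) 0
    simp only [Nat.add_zero] at this
    simp [pvNG, this, Nat.testBit_zero]
  have c3 : (List.range' 0 (k+1)).filterMap (pvNG (2^(k+1)*q)) = [] := by
    rw [List.filterMap_eq_nil_iff]; intro a ha
    have hlt : a < k+1 := by have := List.mem_range'_1.mp ha; omega
    simp [pvNG, pvTestBit_mulPow_lt (k+1) _ a hlt]
  have c4 : ∀ a ∈ List.range' (k+1) (31-k), pvNG (2^k*(2*q+1)) a = pvNG (2^(k+1)*q) a := by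
    intro a ha
    have hb := List.mem_range'_1.mp ha
    obtain ⟨j, rfl⟩ : ∃ j, a = k+(j+1) := ⟨a-k-1, by omega⟩
    have t1 : (2^k*(2*q+1)).testBit (k+(j+1)) = q.testBit j := by
      rw [pvTestBit_mulPow_add k (2*q+1) (j+1), Nat.testBit_add_one]
      congr 1; omega
    have t2 : (2^(k+1)*q).testBit (k+(j+1)) = q.testBit j := by
      have := pvTestBit_mulPow_add (k+1) q j
      simpa [show k+1+j = k+(j+1) from by omega] using this
    simp [pvNG, t1, t2]
  have e1 : List.range' k (32-k) = k :: List.range' (k+1) (31-k) := by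
    have : 32-k = (31-k)+1 := by omega
    rw [this, List.range'_succ]
  have R : (List.range' 0 32).filterMap (pvNG (2^(k+1)*q)) =
      (List.range' (k+1) (31-k)).filterMap (pvNG (2^(k+1)*q)) := by
    rw [pvRangeSplit (k+1) (by omega), List.filterMap_append, c3,
        show 32-(k+1) = 31-k from by omega, List.nil_append]
  rw [R, pvRangeSplit k (by omega), List.filterMap_append, c1, e1, List.filterMap_cons, c2,
      List.filterMap_congr c4, List.nil_append]
  cases pvLabel (k:Int) <;> simp

theorem pvLoopSpec : ∀ n : Nat, n < 2^32 → ∀ acc,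
    pvStripLoop (n : Int) acc = acc ++ (List.range' 0 32).filterMap (pvNG n) := by
  intro n
  induction n using Nat.strong_induction_on with
  | _ n ih =>
    intro hn acc
    rcases Nat.eq_zero_or_pos n with rfl | hpos
    · rw [show ((0:Nat):Int) = 0 from by norm_num, pvStripLoop, dif_pos le_rfl]
      have : ∀ a ∈ List.range' 0 32, pvNG 0 a = none := by
        intro a _; simp [pvNG, Nat.zero_testBit]
      rw [List.filterMap_eq_nil_iff.mpr this]
      simp
    · obtain ⟨k, m, hm, hnm⟩ := Nat.exists_eq_two_pow_mul_odd (by omega : n ≠ 0)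
      obtain ⟨q, hq⟩ := hm
      have hnm' : n = 2^k*(2*q+1) := by rw [hnm, hq]
      have hk32 : k < 32 := by
        have h1 : 2^k ≤ n := by rw [hnm']; calc 2^k = 2^k*1 := by ring
                                                _ ≤ 2^k*(2*q+1) := Nat.mul_le_mul_left _ (by omega)
        have h2 : 2^k < 2^32 := by omega
        exact (Nat.pow_lt_pow_iff_right (by norm_num)).mp h2
      set n' := 2^(k+1)*q with hn'
      have hpk : 0 < 2^k := Nat.two_pow_pos k
      have e2 : n = n' + 2^k := by rw [hnm', hn']; ring
      rw [pvStripLoop, dif_neg (by omega : ¬ ((n:Int) ≤ 0))]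
      have eb : PySem.Int.band (n:Int) ((n:Int) - 1) = ((n':Nat):Int) := by
        have hc : ((n:Int) - 1) = ((n-1 : Nat):Int) := by omega
        rw [hc, PySem.Int.band_natCast]
        congr 1
        calc n &&& (n-1) = (2^k*(2*q+1)) &&& (2^k*(2*q+1) - 1) := by rw [hnm']
          _ = n' := pvAndPred k q
      simp only [eb]
      have ecast : ((n:Nat):Int) = ((n':Nat):Int) + ((2^k:Nat):Int) := by
        rw [e2]; exact Nat.cast_add _ _
      have ed : ((n:Int) - ((n':Nat):Int)) = (((2^k : Nat)):Int) := by omega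
      rw [ed, pvBLpow k]
      have ei : ((((k+1:Nat)):Int) - 1) = ((k:Nat):Int) := by push_cast; omega
      rw [ei]
      have hn'lt : n' < n := by omega
      rw [ih n' hn'lt (by omega)]
      rw [hnm', hn', pvSpecSplit k q hk32]
      cases pvLabel ((k:Nat):Int) <;> simp

-- ---- A: the branch chain computes the filterMap of pvG over 0..31 ----
theorem pvFoldFM (v : Int) (f : Int → String) :
    ∀ (l : List Int), (∀ i ∈ l, pvLabel i = some (f i)) → ∀ acc,
    l.foldl (fun acc i => if PySem.Int.band v (pvShl1 i) ≠ 0 then acc ++ [f i] else acc) acc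
      = acc ++ l.filterMap (pvG v) := by
  intro l
  induction l with
  | nil => simp
  | cons a l ih =>
    intro h acc
    simp only [List.foldl_cons, List.filterMap_cons]
    have ha := h a (by simp)
    by_cases hc : PySem.Int.band v (pvShl1 a) ≠ 0
    · rw [if_pos hc, ih (fun i hi => h i (by simp [hi]))]
      have hg : pvG v a = some (f a) := by simp [pvG, hc, ha]
      rw [hg]; simp
    · rw [if_neg hc, ih (fun i hi => h i (by simp [hi]))]
      have hg : pvG v a = none := by simp [pvG]; intro hcc; exact absurd hcc hc
      rw [hg]

theorem pvSingle (v i : Int) (s : String) (hs : pvLabel i = some s) (bits : List String) :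
    (if PySem.Int.band v (pvShl1 i) ≠ 0 then bits ++ [s] else bits) =
      bits ++ List.filterMap (pvG v) [i] := by
  by_cases hc : PySem.Int.band v (pvShl1 i) ≠ 0 <;> simp [pvG, hc, hs]

theorem pvASpec (v : Int) (h : v ≠ 0) :
    decode_irq_bits_py v =
      (let bits := (PySem.List.pyRange 0 32 1).filterMap (pvG v)
       if bits ≠ [] then PySem.Str.join "," bits else "Unknown") := by
  have h14 : List.filterMap (pvG v) [(14:Int)] = [] := by
    simp [pvG, show pvLabel 14 = none from by decide]
  have h16 : List.filterMap (pvG v) [(16:Int)] = [] := by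
    simp [pvG, show pvLabel 16 = none from by decide]
  simp only [decode_irq_bits_py, if_neg h]
  refine congrArg (fun bits => if bits ≠ [] then PySem.Str.join "," bits else "Unknown") ?_
  rw [pvFoldFM v (fun i => "Pager" ++ PySem.Int.toStr i) _ (by decide),
      pvFoldFM v (fun i => "Beacon" ++ PySem.Int.toStr (i - 17)) _ (by decide),
      pvFoldFM v (fun i => "Bit" ++ PySem.Int.toStr i) _ (by decide),
      pvSingle v 15 "TxStatus" (by decide),
      pvSingle v 25 "NDP0" (by decide),
      pvSingle v 26 "NDP1" (by decide),
      pvSingle v 27 "HW_STOP" (by decide)]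
  rw [show PySem.List.pyRange 0 32 1 = PySem.List.pyRange 0 14 1 ++
        ([(14:Int)] ++ ([(15:Int)] ++ ([(16:Int)] ++ (PySem.List.pyRange 17 25 1 ++
        ([(25:Int)] ++ ([(26:Int)] ++ ([(27:Int)] ++ PySem.List.pyRange 28 32 1)))))))
      from by decide]
  simp only [List.filterMap_append, h14, h16]
  simp [List.append_assoc]

-- ---- B assembled ----
theorem pvMaskNonneg (v : Int) : 0 ≤ PySem.Int.band v 4294967295 := by
  rw [PySem.Int.band_comm]
  exact PySem.Int.band_nonneg_of_nonneg_left v (by norm_num)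

theorem pvMaskLt (v : Int) : (PySem.Int.band v 4294967295).toNat < 2^32 := by
  have hM : (4294967295:Int).toNat = 2^32 - 1 := by decide
  by_cases hv : 0 ≤ v
  · rw [PySem.Int.band_of_nonneg hv (by norm_num), Int.toNat_natCast, hM, Nat.and_comm, pvMaskMod]
    exact lt_of_lt_of_le (Nat.mod_lt _ (by positivity)) (le_refl _)
  · have h1 : PySem.Int.band v 4294967295 = ((2^32 - 1 - ((-v-1).toNat % 2^32) : Nat) : Int) := by
      simp only [PySem.Int.band, if_neg hv, if_pos (by norm_num : (0:Int) ≤ 4294967295)]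
      rw [hM, pvMaskMod]
    rw [h1, Int.toNat_natCast]
    omega

theorem pvBSpec (v : Int) (h : v ≠ 0) :
    decode_irq_bits_py_alt v =
      (let bits := (PySem.List.pyRange 0 32 1).filterMap (pvG v)
       if bits ≠ [] then PySem.Str.join "," bits else "Unknown") := by
  simp only [decode_irq_bits_py_alt, if_neg h]
  have hcast : PySem.Int.band v 4294967295 = (((PySem.Int.band v 4294967295).toNat : Nat) : Int) :=
    (Int.toNat_of_nonneg (pvMaskNonneg v)).symm
  rw [hcast, pvLoopSpec _ (pvMaskLt v) [], List.nil_append]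
  have hre : PySem.List.pyRange 0 32 1 = (List.range' 0 32).map (fun k : Nat => (k:Int)) := by decide
  rw [hre, List.filterMap_map]
  refine congrArg (fun bits => if bits ≠ [] then PySem.Str.join "," bits else "Unknown") ?_
  apply List.filterMap_congr
  intro a ha
  have ha32 : a < 32 := by have := List.mem_range'_1.mp ha; omega
  simpa using pvBit v a ha32

-- ===== VERDICT (by name: the statement is the Claim_ definition above) =====
theorem decode_irq_bits_py_spec : Claim_equal_decode_irq_bits_py := by
  unfold Claim_equal_decode_irq_bits_py Spec_decode_irq_bits_py
  intro v _
  by_cases h0 : v = 0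
  · simp [h0, decode_irq_bits_py, decode_irq_bits_py_alt]
  · rw [pvASpec v h0, pvBSpec v h0]
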